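-- pv_equiv track=rewrite | github.com/setiastro/setiastrosuitepro | pro/mfdeconv.py | _tiles_of
-- ===== SOURCE A (Python) =====
-- def _tiles_of(hw: tuple[int,int], tile_hw: tuple[int,int], halo: int):
--     """
--     Yield tiles as dicts: {y0,y1,x0,x1,yc0,yc1,xc0,xc1}
--     (outer region includes halo; core (yc0:yc1, xc0:xc1) excludes halo).
--     """
--     H, W = hw
--     th, tw = tile_hw
--     th = max(1, int(th)); tw = max(1, int(tw))
--     for y in range(0, H, th):
--         for x in range(0, W, tw):
--             yc0 = y; yc1 = min(y + th, H)
--             xc0 = x; xc1 = min(x + tw, W)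
--             y0  = max(0, yc0 - halo); y1 = min(H, yc1 + halo)
--             x0  = max(0, xc0 - halo); x1 = min(W, xc1 + halo)
--             yield dict(y0=y0, y1=y1, x0=x0, x1=x1, yc0=yc0, yc1=yc1, xc0=xc0, xc1=xc1)
-- ===== SOURCE B (Python) =====
-- def _tiles_of(hw, tile_hw, halo):
--     # Single flat loop over a linear tile index with divmod, instead of nested
--     # y/x range loops: the tile grid size is computed in closed form first.
--     H, W = hw
--     th, tw = tile_hw
--     th = max(1, int(th)); tw = max(1, int(tw))
--     nrows = max(0, (H + th - 1) // th)
--     ncols = max(0, (W + tw - 1) // tw)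
--     for k in range(nrows * ncols):
--         yc0 = (k // ncols) * th
--         xc0 = (k % ncols) * tw
--         yc1 = min(yc0 + th, H)
--         xc1 = min(xc0 + tw, W)
--         yield dict(y0=max(0, yc0 - halo), y1=min(H, yc1 + halo),
--                    x0=max(0, xc0 - halo), x1=min(W, xc1 + halo),
--                    yc0=yc0, yc1=yc1, xc0=xc0, xc1=xc1)
-- ===== Notes on version B (the rewrite author's own statement) =====
-- stated objective: alternative
-- what changed: B replaces the nested y/x range loops by a closed-form tile count (ceil-division nrows*ncols) and a single flat loop over the linear tile index, recovering the row/column of each tile with divmod.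
import Mathlib
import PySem

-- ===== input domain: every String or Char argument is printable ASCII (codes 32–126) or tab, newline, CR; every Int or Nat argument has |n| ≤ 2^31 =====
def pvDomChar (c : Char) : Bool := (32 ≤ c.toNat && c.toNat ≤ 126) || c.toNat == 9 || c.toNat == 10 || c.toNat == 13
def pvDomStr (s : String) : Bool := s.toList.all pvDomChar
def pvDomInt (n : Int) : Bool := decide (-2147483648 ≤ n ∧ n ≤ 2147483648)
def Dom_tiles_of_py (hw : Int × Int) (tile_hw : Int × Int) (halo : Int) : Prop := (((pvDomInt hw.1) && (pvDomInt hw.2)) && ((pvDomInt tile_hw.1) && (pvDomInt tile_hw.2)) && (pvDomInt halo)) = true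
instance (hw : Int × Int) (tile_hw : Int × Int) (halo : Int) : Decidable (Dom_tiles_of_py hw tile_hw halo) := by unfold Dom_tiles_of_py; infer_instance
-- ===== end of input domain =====

-- B replaces the nested y/x loops by a closed-form tile count and one flat divmod-indexed loop (alternative decomposition, same cost).

-- ===== PORT A =====
def tiles_of_py (hw : Int × Int) (tile_hw : Int × Int) (halo : Int) : List (List (String × Int)) :=
  let H := hw.1
  let W := hw.2
  let th := max 1 tile_hw.1
  let tw := max 1 tile_hw.2
  (PySem.List.pyRange 0 H th).foldl (fun acc y =>
    (PySem.List.pyRange 0 W tw).foldl (fun acc x =>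
      let yc0 := y
      let yc1 := min (y + th) H
      let xc0 := x
      let xc1 := min (x + tw) W
      let y0 := max 0 (yc0 - halo)
      let y1 := min H (yc1 + halo)
      let x0 := max 0 (xc0 - halo)
      let x1 := min W (xc1 + halo)
      acc ++ [[("y0", y0), ("y1", y1), ("x0", x0), ("x1", x1),
               ("yc0", yc0), ("yc1", yc1), ("xc0", xc0), ("xc1", xc1)]]) acc) []

-- ===== PORT B =====
def tiles_of_py_alt (hw : Int × Int) (tile_hw : Int × Int) (halo : Int) : List (List (String × Int)) :=
  let H := hw.1
  let W := hw.2
  let th := max 1 tile_hw.1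
  let tw := max 1 tile_hw.2
  let nrows := max 0 (PySem.Int.floordiv (H + th - 1) th)
  let ncols := max 0 (PySem.Int.floordiv (W + tw - 1) tw)
  (PySem.List.pyRange 0 (nrows * ncols) 1).map (fun k =>
    let yc0 := (PySem.Int.floordiv k ncols) * th
    let xc0 := (PySem.Int.mod k ncols) * tw
    let yc1 := min (yc0 + th) H
    let xc1 := min (xc0 + tw) W
    [("y0", max 0 (yc0 - halo)), ("y1", min H (yc1 + halo)),
     ("x0", max 0 (xc0 - halo)), ("x1", min W (xc1 + halo)),
     ("yc0", yc0), ("yc1", yc1), ("xc0", xc0), ("xc1", xc1)])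

-- ===== PRECONDITION & SPEC =====
def Spec_tiles_of_py (hw : Int × Int) (tile_hw : Int × Int) (halo : Int) (out : List (List (String × Int))) : Prop := out = tiles_of_py_alt hw tile_hw halo
instance (hw : Int × Int) (tile_hw : Int × Int) (halo : Int) (out : List (List (String × Int))) : Decidable (Spec_tiles_of_py hw tile_hw halo out) := by unfold Spec_tiles_of_py; infer_instance

-- ===== CLAIM (what is proved, stated in full; the proofs are below) =====
def Claim_equal_tiles_of_py : Prop := ∀ (hw : Int × Int) (tile_hw : Int × Int) (halo : Int), Dom_tiles_of_py hw tile_hw halo → Spec_tiles_of_py hw tile_hw halo (tiles_of_py hw tile_hw halo)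

-- ===== LEMMAS AND PROOFS =====

-- flat linear index over an R×C grid = nested row/column iteration
theorem pv_flat_index {α : Type} (f : Nat → Nat → α) (R C : Nat) :
    (List.range (R * C)).map (fun k => f (k / C) (k % C)) =
      (List.range R).flatMap (fun i => (List.range C).map (fun j => f i j)) := by
  rcases Nat.eq_zero_or_pos C with hC | hC
  · simp [hC]
  · induction R with
    | zero => simp
    | succ R ih =>
      have h2 : (List.map (fun x => R * C + x) (List.range C)).map
            (fun k => f (k / C) (k % C)) = List.map (fun j => f R j) (List.range C) := by
        rw [List.map_map]
        refine List.map_congr_left (fun x hx => ?_)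
        have hxC : x < C := List.mem_range.mp hx
        have h1 : (R * C + x) / C = R := by
          rw [Nat.mul_comm R C, Nat.mul_add_div hC, Nat.div_eq_of_lt hxC, Nat.add_zero]
        have h1' : (R * C + x) % C = x := by
          rw [Nat.mul_comm R C, Nat.mul_add_mod, Nat.mod_eq_of_lt hxC]
        simp [h1, h1']
      rw [Nat.succ_mul, List.range_add, List.map_append, ih, List.range_succ,
          List.flatMap_append, h2]
      simp

-- the number of tiles along an axis: ceil division, clamped at 0
theorem pv_axis_count (L s : Int) (hs : 0 < s) :
    (max 0 (PySem.Int.floordiv (L + s - 1) s)).toNat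
      = (if (0:Int) < L then ((L - 0 + s - 1) / s).toNat else 0) := by
  rw [PySem.Int.floordiv_eq_ediv_of_pos hs]
  have hd := Int.mul_ediv_add_emod (L + s - 1) s
  have hr0 := Int.emod_nonneg (L + s - 1) (by omega : s ≠ 0)
  have hrs := Int.emod_lt_of_pos (L + s - 1) hs
  set q := (L + s - 1) / s with hq
  set r := (L + s - 1) % s with hr
  by_cases hL : (0:Int) < L
  · have hqpos : 0 < q := by nlinarith
    simp only [if_pos hL, Int.sub_zero]
    omega
  · have hqle : q ≤ 0 := by nlinarith
    simp only [if_neg hL]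
    omega

-- ===== VERDICT (by name: the statement is the Claim_ definition above) =====
theorem tiles_of_py_spec : Claim_equal_tiles_of_py := by
  intro hw tile_hw halo _
  unfold Spec_tiles_of_py tiles_of_py tiles_of_py_alt
  simp only []
  set H := hw.1
  set W := hw.2
  set th := max 1 tile_hw.1 with hth
  set tw := max 1 tile_hw.2 with htw
  have hthp : (0:Int) < th := by rw [hth]; omega
  have htwp : (0:Int) < tw := by rw [htw]; omega
  set nrows := max 0 (PySem.Int.floordiv (H + th - 1) th) with hnr
  set ncols := max 0 (PySem.Int.floordiv (W + tw - 1) tw) with hnc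
  set nR : Nat := nrows.toNat with hnR
  set nC : Nat := ncols.toNat with hnC
  have hnrc : nrows = (nR : Int) := by rw [hnR]; simp [hnr]
  have hncc : ncols = (nC : Int) := by rw [hnC]; simp [hnc]
  -- the canonical per-tile record, indexed by (row, column)
  set g : Nat → Nat → List (String × Int) := fun i j =>
    [("y0", max 0 (0 + th * (i:Int) - halo)),
     ("y1", min H (min (0 + th * (i:Int) + th) H + halo)),
     ("x0", max 0 (0 + tw * (j:Int) - halo)),
     ("x1", min W (min (0 + tw * (j:Int) + tw) W + halo)),
     ("yc0", 0 + th * (i:Int)), ("yc1", min (0 + th * (i:Int) + th) H),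
     ("xc0", 0 + tw * (j:Int)), ("xc1", min (0 + tw * (j:Int) + tw) W)] with hg
  -- A side: nested ranges → flatMap of maps over Nat ranges
  have hA := PySem.List.foldl_congr_mem (PySem.List.pyRange 0 H th)
      (fun acc y => (PySem.List.pyRange 0 W tw).foldl (fun acc x =>
        acc ++ [[("y0", max 0 (y - halo)), ("y1", min H (min (y + th) H + halo)),
                 ("x0", max 0 (x - halo)), ("x1", min W (min (x + tw) W + halo)),
                 ("yc0", y), ("yc1", min (y + th) H), ("xc0", x), ("xc1", min (x + tw) W)]]) acc)
      (fun acc y => acc ++ (PySem.List.pyRange 0 W tw).map (fun x =>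
        [("y0", max 0 (y - halo)), ("y1", min H (min (y + th) H + halo)),
         ("x0", max 0 (x - halo)), ("x1", min W (min (x + tw) W + halo)),
         ("yc0", y), ("yc1", min (y + th) H), ("xc0", x), ("xc1", min (x + tw) W)]))
      [] (fun acc y _ => PySem.List.foldl_append_singleton_eq_map _ _ _)
  rw [hA, PySem.List.foldl_append_eq_flatMap, List.nil_append,
      PySem.List.pyRange_of_pos 0 H hthp, PySem.List.pyRange_of_pos 0 W htwp]
  have hRcount : (if (0:Int) < H then ((H - 0 + th - 1) / th).toNat else 0) = nR :=
    (pv_axis_count H th hthp).symm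
  have hCcount : (if (0:Int) < W then ((W - 0 + tw - 1) / tw).toNat else 0) = nC :=
    (pv_axis_count W tw htwp).symm
  rw [hRcount, hCcount]
  -- A side equals the canonical flatMap
  have hL : (List.flatMap (fun y =>
      List.map (fun x =>
        [("y0", max 0 (y - halo)), ("y1", min H (min (y + th) H + halo)),
         ("x0", max 0 (x - halo)), ("x1", min W (min (x + tw) W + halo)),
         ("yc0", y), ("yc1", min (y + th) H), ("xc0", x), ("xc1", min (x + tw) W)])
        (List.map (fun k : Nat => 0 + tw * (k:Int)) (List.range nC)))
      (List.map (fun k : Nat => 0 + th * (k:Int)) (List.range nR)))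
      = (List.range nR).flatMap (fun i => (List.range nC).map (fun j => g i j)) := by
    rw [List.flatMap_map]
    refine congrArg (fun F => List.flatMap F (List.range nR)) (funext fun i => ?_)
    rw [List.map_map]
    rfl
  rw [hL]
  -- B side equals the canonical flat map
  rw [hnrc, hncc, PySem.List.pyRange_one]
  have hcast : ((((nR:Int)) * ((nC:Int)) - 0).toNat) = nR * nC := by omega
  rw [hcast, List.map_map]
  rw [← pv_flat_index g nR nC]
  refine (List.map_congr_left (fun k hk => ?_)).symm
  have hkm : k < nR * nC := List.mem_range.mp hk
  have hC0 : 0 < nC := by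
    rcases Nat.eq_zero_or_pos nC with h | h
    · rw [h, Nat.mul_zero] at hkm; omega
    · exact h
  have hfd : PySem.Int.floordiv ((0:Int) + (k:Int)) ((nC:Int)) = ((k / nC : Nat) : Int) := by
    rw [Int.zero_add]; exact_mod_cast PySem.Int.floordiv_natCast k nC
  have hmd : PySem.Int.mod ((0:Int) + (k:Int)) ((nC:Int)) = ((k % nC : Nat) : Int) := by
    rw [Int.zero_add]; exact_mod_cast PySem.Int.mod_natCast k nC
  simp only [Function.comp_def, hfd, hmd, hg]
  simp [Int.mul_comm]
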